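-- pv_equiv track=rewrite | github.com/nour0205/RAGent | app/orchestration/registry.py | normalize_document_id
-- ===== SOURCE A (Python) =====
-- DOC_REGISTRY = {
--     "postgres": {
--         "document_id": "db_postgres",
--         "description": "PostgreSQL MVCC and concurrency model",
--         "aliases": ["postgresql", "postgres", "pg"]
--     },
--     "sqlserver": {
--         "document_id": "db_sqlserver",
--         "description": "SQL Server snapshot isolation",
--         "aliases": ["sqlserver", "sql server", "sql_server", "mssql"]
--     },
--     "mongodb": {
--         "document_id": "db_mongodb_indexing",
--         "description": "MongoDB indexing and query performance",
--         "aliases": ["mongodb", "mongo", "mongo db"]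
--     }
-- }
--
-- def normalize_document_id(value: str) -> str:
--     if not value:
--         return value
--
--     key = value.strip().lower()
--
--     for _, entry in DOC_REGISTRY.items():
--         document_id = entry["document_id"]
--         aliases = entry.get("aliases", [])
--
--         if key == document_id.lower():
--             return document_id
--
--         if key in [alias.lower() for alias in aliases]:
--             return document_id
--
--     return value
-- ===== SOURCE B (Python) =====
-- DOC_REGISTRY = {
--     "postgres": {
--         "document_id": "db_postgres",
--         "description": "PostgreSQL MVCC and concurrency model",
--         "aliases": ["postgresql", "postgres", "pg"]
--     },
--     "sqlserver": {
--         "document_id": "db_sqlserver",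
--         "description": "SQL Server snapshot isolation",
--         "aliases": ["sqlserver", "sql server", "sql_server", "mssql"]
--     },
--     "mongodb": {
--         "document_id": "db_mongodb_indexing",
--         "description": "MongoDB indexing and query performance",
--         "aliases": ["mongodb", "mongo", "mongo db"]
--     }
-- }
--
-- ALIAS_TO_ID = {}
-- for _entry in DOC_REGISTRY.values():
--     _doc_id = _entry["document_id"]
--     ALIAS_TO_ID.setdefault(_doc_id.lower(), _doc_id)
--     for _alias in _entry.get("aliases", []):
--         ALIAS_TO_ID.setdefault(_alias.lower(), _doc_id)
--
-- def normalize_document_id(value: str) -> str: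
--     if not value:
--         return value
--     key = value.strip().lower()
--     return ALIAS_TO_ID.get(key, value)
-- ===== Notes on version B (the rewrite author's own statement) =====
-- stated objective: idiomatic
-- what changed: A flat alias->canonical-id dict is precomputed once at module scope, so the per-call nested scan over registry entries with inline lowercasing becomes a single dict lookup with the original value as default.
import Mathlib
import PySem

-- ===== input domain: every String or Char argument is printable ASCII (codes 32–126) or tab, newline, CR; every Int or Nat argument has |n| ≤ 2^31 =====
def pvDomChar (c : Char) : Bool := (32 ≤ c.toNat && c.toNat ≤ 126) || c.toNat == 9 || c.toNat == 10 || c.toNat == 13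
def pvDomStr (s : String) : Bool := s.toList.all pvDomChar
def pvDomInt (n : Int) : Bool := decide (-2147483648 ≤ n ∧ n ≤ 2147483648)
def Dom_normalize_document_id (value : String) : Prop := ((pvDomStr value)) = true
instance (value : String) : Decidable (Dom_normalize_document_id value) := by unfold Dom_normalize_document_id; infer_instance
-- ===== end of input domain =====

-- B replaces A's per-call nested scan over the registry with one precomputed flat
-- alias->id dict and a single lookup (idiomatic); same return value everywhere.

-- ===== PORT A =====
-- DOC_REGISTRY as (name, (document_id, aliases)); descriptions are unused by the function.
def pvRegistry : List (String × String × List String) :=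
  [("postgres", "db_postgres", ["postgresql", "postgres", "pg"]),
   ("sqlserver", "db_sqlserver", ["sqlserver", "sql server", "sql_server", "mssql"]),
   ("mongodb", "db_mongodb_indexing", ["mongodb", "mongo", "mongo db"])]

def pvLoopA (key value : String) : List (String × String × List String) → String
  | [] => value
  | (_, document_id, aliases) :: rest =>
    if key == PySem.Str.lower document_id then document_id
    else if (aliases.map (fun a => PySem.Str.lower a)).contains key then document_id
    else pvLoopA key value rest

def normalize_document_id (value : String) : String :=
  if value == "" then value
  else pvLoopA (PySem.Str.lower (PySem.Str.strip value)) value pvRegistry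

-- ===== PORT B =====
-- the module-scope building loop of Source B (setdefault = insert only if absent)
def pvAliasToId : PySem.Dict String String :=
  pvRegistry.foldl
    (fun d e =>
      let d := if d.contains (PySem.Str.lower e.2.1) then d else d.insert (PySem.Str.lower e.2.1) e.2.1
      e.2.2.foldl (fun d a => if d.contains (PySem.Str.lower a) then d else d.insert (PySem.Str.lower a) e.2.1) d)
    PySem.Dict.empty

def normalize_document_id_alt (value : String) : String :=
  if value == "" then value
  else (pvAliasToId.get? (PySem.Str.lower (PySem.Str.strip value))).getD value

-- ===== PRECONDITION & SPEC =====
def Spec_normalize_document_id (value : String) (out : String) : Prop := out = normalize_document_id_alt value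
instance (value : String) (out : String) : Decidable (Spec_normalize_document_id value out) := by unfold Spec_normalize_document_id; infer_instance

-- ===== CLAIM (what is proved, stated in full; the proofs are below) =====
def Claim_equal_normalize_document_id : Prop := ∀ (value : String), Dom_normalize_document_id value → Spec_normalize_document_id value (normalize_document_id value)

-- ===== LEMMAS AND PROOFS =====
-- the loop of A agrees with the flat-table lookup for EVERY key
theorem pvLoop_eq_lookup (key value : String) :
    pvLoopA key value pvRegistry = (pvAliasToId.get? key).getD value := by
  by_cases h1 : key = "db_postgres"
  · subst h1; rfl
  by_cases h2 : key = "postgresql"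
  · subst h2; rfl
  by_cases h3 : key = "postgres"
  · subst h3; rfl
  by_cases h4 : key = "pg"
  · subst h4; rfl
  by_cases h5 : key = "db_sqlserver"
  · subst h5; rfl
  by_cases h6 : key = "sqlserver"
  · subst h6; rfl
  by_cases h7 : key = "sql server"
  · subst h7; rfl
  by_cases h8 : key = "sql_server"
  · subst h8; rfl
  by_cases h9 : key = "mssql"
  · subst h9; rfl
  by_cases h10 : key = "db_mongodb_indexing"
  · subst h10; rfl
  by_cases h11 : key = "mongodb"
  · subst h11; rfl
  by_cases h12 : key = "mongo"
  · subst h12; rfl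
  by_cases h13 : key = "mongo db"
  · subst h13; rfl
  simp [pvLoopA, pvRegistry, pvAliasToId, PySem.Dict.get?, PySem.Dict.insert,
    PySem.Dict.contains, PySem.Dict.empty, show PySem.Str.lower "db_postgres" = "db_postgres" from rfl, show PySem.Str.lower "postgresql" = "postgresql" from rfl, show PySem.Str.lower "postgres" = "postgres" from rfl, show PySem.Str.lower "pg" = "pg" from rfl, show PySem.Str.lower "db_sqlserver" = "db_sqlserver" from rfl, show PySem.Str.lower "sqlserver" = "sqlserver" from rfl, show PySem.Str.lower "sql server" = "sql server" from rfl, show PySem.Str.lower "sql_server" = "sql_server" from rfl, show PySem.Str.lower "mssql" = "mssql" from rfl, show PySem.Str.lower "db_mongodb_indexing" = "db_mongodb_indexing" from rfl, show PySem.Str.lower "mongodb" = "mongodb" from rfl, show PySem.Str.lower "mongo" = "mongo" from rfl, show PySem.Str.lower "mongo db" = "mongo db" from rfl, h1, Ne.symm h1, h2, Ne.symm h2, h3, Ne.symm h3, h4, Ne.symm h4, h5, Ne.symm h5, h6, Ne.symm h6, h7, Ne.symm h7, h8, Ne.symm h8, h9, Ne.symm h9, h10, Ne.symm h10, h11, Ne.symm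 h11, h12, Ne.symm h12, h13, Ne.symm h13]

-- ===== VERDICT (by name: the statement is the Claim_ definition above) =====
theorem normalize_document_id_spec : Claim_equal_normalize_document_id := by
  intro value _
  unfold Spec_normalize_document_id normalize_document_id normalize_document_id_alt
  by_cases h : value == ""
  · simp [h]
  · simp only [h, Bool.false_eq_true, ite_false]
    exact pvLoop_eq_lookup _ _
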